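-- pv_equiv track=rewrite | github.com/pypi-data/pypi-mirror-331 | packages/peachpayments-partner/peachpayments_partner-0.1.14-py3-none-any.whl/peachpayments_partner/jwt_formatter.py | is_valid_jwt
-- ===== SOURCE A (Python) =====
-- def is_valid_jwt(token: str) -> bool:
--     """Checks if JWT token is valid.
--
--     Args:
--         token (str): JWT token.
--
--     Returns:
--         bool: True if JWT token is valid, False otherwise.
--     """
--     split_token = token.split(".")
--     if len(split_token) != 3:
--         return False
--     for segments in split_token:
--         if len(segments) < 1:
--             return False
--     return True
-- ===== SOURCE B (Python) =====
-- def is_valid_jwt(token: str) -> bool: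
--     """Single left-to-right scan: count dots, reject empty segments on the fly."""
--     dots = 0
--     seg_len = 0
--     for ch in token:
--         if ch == ".":
--             if seg_len == 0:
--                 return False
--             dots += 1
--             seg_len = 0
--         else:
--             seg_len += 1
--     return dots == 2 and seg_len > 0
-- ===== Notes on version B (the rewrite author's own statement) =====
-- stated objective: alternative
-- what changed: Replaces split-into-a-list plus a per-segment loop by a single character scan that counts dots and tracks the current segment length, so no intermediate list is built.
import Mathlib
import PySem

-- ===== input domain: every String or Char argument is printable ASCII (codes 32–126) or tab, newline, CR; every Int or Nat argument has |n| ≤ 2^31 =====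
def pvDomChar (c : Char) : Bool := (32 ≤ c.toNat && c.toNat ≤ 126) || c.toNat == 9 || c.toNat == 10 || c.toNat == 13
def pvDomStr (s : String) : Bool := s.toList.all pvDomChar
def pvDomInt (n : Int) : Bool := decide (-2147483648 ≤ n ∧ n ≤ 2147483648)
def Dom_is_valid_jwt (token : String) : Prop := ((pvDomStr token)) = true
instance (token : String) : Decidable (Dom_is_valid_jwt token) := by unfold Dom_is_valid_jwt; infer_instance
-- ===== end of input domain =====

-- B replaces split-plus-segment-loop by a single character scan (alternative, same cost).

-- ===== PORT A =====
-- the "for segments in split_token: if len(segments) < 1: return False" loop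
def jwtCheckSegs : List (List Char) → Bool
  | [] => true
  | s :: rest => if s.length < 1 then false else jwtCheckSegs rest

def is_valid_jwt (token : String) : Bool :=
  let split_token := PySem.Chars.splitOn token.toList ['.']
  if split_token.length ≠ 3 then false
  else jwtCheckSegs split_token

-- ===== PORT B =====
-- the for-loop of Source B: state (dots, seg_len), early return False on an empty segment
def jwtScan : List Char → Nat → Nat → Bool
  | [], dots, segLen => dots == 2 && segLen > 0
  | c :: rest, dots, segLen =>
    if c = '.' then
      if segLen = 0 then false else jwtScan rest (dots + 1) 0
    else jwtScan rest dots (segLen + 1)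

def is_valid_jwt_alt (token : String) : Bool :=
  jwtScan token.toList 0 0

-- ===== PRECONDITION & SPEC =====
def Spec_is_valid_jwt (token : String) (out : Bool) : Prop := out = is_valid_jwt_alt token
instance (token : String) (out : Bool) : Decidable (Spec_is_valid_jwt token out) := by unfold Spec_is_valid_jwt; infer_instance

-- ===== CLAIM (what is proved, stated in full; the proofs are below) =====
def Claim_equal_is_valid_jwt : Prop := ∀ (token : String), Dom_is_valid_jwt token → Spec_is_valid_jwt token (is_valid_jwt token)

-- ===== LEMMAS AND PROOFS =====

-- simple reference form of splitting on '.'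
def dsplit : List Char → List (List Char)
  | [] => [[]]
  | c :: rest =>
    if c = '.' then [] :: dsplit rest
    else
      match dsplit rest with
      | s :: ss => (c :: s) :: ss
      | [] => [[c]]

theorem dsplit_ne_nil (cs : List Char) : dsplit cs ≠ [] := by
  cases cs with
  | nil => simp [dsplit]
  | cons c rest =>
    simp only [dsplit]
    split_ifs
    · simp
    · cases h : dsplit rest <;> simp


theorem splitOn_go_eq : ∀ (fuel : Nat) (l cur : List Char) (acc : List (List Char)),
    l.length < fuel →
    PySem.Chars.splitOn.go ['.'] fuel l cur acc
      = acc.reverse ++ (dsplit l).modifyHead (fun s => cur.reverse ++ s) := by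
  intro fuel
  induction fuel with
  | zero => intro l cur acc h; omega
  | succ fuel ih =>
    intro l cur acc h
    cases l with
    | nil =>
      simp [PySem.Chars.splitOn.go, dsplit]
    | cons c rest =>
      by_cases hc : c = '.'
      · subst hc
        rw [show PySem.Chars.splitOn.go ['.'] (fuel + 1) ('.' :: rest) cur acc
              = PySem.Chars.splitOn.go ['.'] fuel rest [] (cur.reverse :: acc) from by
            simp [PySem.Chars.splitOn.go, List.isPrefixOf]]
        rw [ih rest [] (cur.reverse :: acc) (by simpa using Nat.lt_of_succ_lt_succ h)]
        simp only [dsplit, if_pos rfl]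
        cases dsplit rest <;> simp
      · rw [show PySem.Chars.splitOn.go ['.'] (fuel + 1) (c :: rest) cur acc
              = PySem.Chars.splitOn.go ['.'] fuel rest (c :: cur) acc from by
            simp only [PySem.Chars.splitOn.go, List.isPrefixOf]
            rw [if_neg]
            simp [Ne.symm hc]]
        rw [ih rest (c :: cur) acc (by simpa using Nat.lt_of_succ_lt_succ h)]
        simp only [dsplit, if_neg hc]
        cases hrest : dsplit rest with
        | nil => exact absurd hrest (dsplit_ne_nil rest)
        | cons s ss => simp

theorem splitOn_eq_dsplit (cs : List Char) :
    PySem.Chars.splitOn cs ['.'] = dsplit cs := by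
  unfold PySem.Chars.splitOn
  rw [splitOn_go_eq (cs.length + 1) cs [] [] (by omega)]
  cases h : dsplit cs with
  | nil => exact absurd h (dsplit_ne_nil cs)
  | cons s ss => simp

theorem jwtCheckSegs_eq_all (l : List (List Char)) :
    jwtCheckSegs l = l.all (fun s => !s.isEmpty) := by
  induction l with
  | nil => simp [jwtCheckSegs]
  | cons s rest ih =>
    simp only [jwtCheckSegs, List.all_cons, ih]
    cases s <;> simp

theorem jwtScan_spec : ∀ (cs : List Char) (dots segLen : Nat),
    jwtScan cs dots segLen
      = (decide (dots + (dsplit cs).length = 3)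
          && decide (0 < segLen + ((dsplit cs).headI).length)
          && ((dsplit cs).tail.all (fun s => !s.isEmpty))) := by
  intro cs
  induction cs with
  | nil =>
    intro dots segLen
    simp only [jwtScan, dsplit]
    simp only [List.length_cons, List.length_nil, List.headI, List.tail, List.all_nil]
    rcases eq_or_ne dots 2 with h | h <;> simp [h] <;> omega
  | cons c rest ih =>
    intro dots segLen
    by_cases hc : c = '.'
    · subst hc
      simp only [jwtScan, dsplit]
      by_cases hs : segLen = 0
      · simp [hs]
      · rw [if_neg hs, ih (dots + 1) 0]
        cases hres : dsplit rest with
        | nil => exact absurd hres (dsplit_ne_nil rest)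
        | cons s ss =>
          simp only [List.length_cons, List.headI, List.tail]
          have h1 : (dots + 1 + (s :: ss).length = 3) ↔ (dots + (1 + (s :: ss).length) = 3) := by
            simp; omega
          rcases eq_or_ne (dots + 1 + (s :: ss).length) 3 with h | h
          · simp only [List.length_cons] at h ⊢
            cases s <;> simp_all <;> try omega
          · simp only [List.length_cons] at h ⊢
            have h2 : ¬ (dots + (ss.length + 1 + 1) = 3) := by omega
            simp [show ¬ (dots + 1 + (ss.length + 1) = 3) from by omega, h2, hs]
    · rw [show jwtScan (c :: rest) dots segLen = jwtScan rest dots (segLen + 1) from by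
          simp [jwtScan, hc]]
      rw [ih dots (segLen + 1)]
      simp only [dsplit, if_neg hc]
      cases hres : dsplit rest with
      | nil => exact absurd hres (dsplit_ne_nil rest)
      | cons s ss =>
        simp only [List.headI, List.tail, List.length_cons]
        have e1 : 0 < segLen + 1 + s.length := by omega
        have e2 : 0 < segLen + (s.length + 1) := by omega
        simp [e1, e2]
        try rfl

-- ===== VERDICT (by name: the statement is the Claim_ definition above) =====
theorem is_valid_jwt_spec : Claim_equal_is_valid_jwt := by
  intro token _
  unfold Spec_is_valid_jwt is_valid_jwt is_valid_jwt_alt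
  rw [jwtScan_spec token.toList 0 0]
  simp only [splitOn_eq_dsplit, jwtCheckSegs_eq_all]
  cases hres : dsplit token.toList with
  | nil => exact absurd hres (dsplit_ne_nil token.toList)
  | cons s ss =>
    simp only [List.length_cons, List.headI, List.tail, List.all_cons]
    rcases eq_or_ne (ss.length + 1) 3 with h | h
    · rw [if_neg (by omega)]
      simp only [h, Nat.zero_add, decide_true, Bool.true_and]
      cases s <;> simp
    · rw [if_pos (by omega)]
      have h2 : ss.length ≠ 2 := by omega
      simp [h2]
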